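-- pv_equiv track=rewrite | github.com/AdamZhouSE/pythonHomework | Code/CodeRecords/2318/61132/304797.py | seartree
-- ===== SOURCE A (Python) =====
-- def seartree(l,u):
--     if not l[u]:
--         return 1
--     le=ri=0
--     if l[u][0]>=0:
--         if l[u][0]>=u:
--             return -1
--         else:
--             le=seartree(l,l[u][0])
--     if l[u][1]>=0:
--         if l[u][1]<=u:
--             return -1
--         else:
--             ri=seartree(l,l[u][1])
--     return 1+le+ri if le>=0 and ri>=0 else -1
-- ===== SOURCE B (Python) =====
-- def seartree(l, u):
--     count = 0
--     stack = [u]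
--     while stack:
--         node = stack.pop()
--         count += 1
--         row = l[node]
--         if row:
--             a = row[0]
--             if a >= 0:
--                 if a >= node:
--                     return -1
--                 stack.append(a)
--             b = row[1]
--             if b >= 0:
--                 if b <= node:
--                     return -1
--                 stack.append(b)
--     return count
-- ===== Notes on version B (the rewrite author's own statement) =====
-- stated objective: alternative
-- what changed: Replaces the recursion with an iterative explicit-stack DFS that keeps one running node counter and returns -1 immediately at the first ordering violation, instead of propagating -1 sentinels up through recursive sums.
import Mathlib
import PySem

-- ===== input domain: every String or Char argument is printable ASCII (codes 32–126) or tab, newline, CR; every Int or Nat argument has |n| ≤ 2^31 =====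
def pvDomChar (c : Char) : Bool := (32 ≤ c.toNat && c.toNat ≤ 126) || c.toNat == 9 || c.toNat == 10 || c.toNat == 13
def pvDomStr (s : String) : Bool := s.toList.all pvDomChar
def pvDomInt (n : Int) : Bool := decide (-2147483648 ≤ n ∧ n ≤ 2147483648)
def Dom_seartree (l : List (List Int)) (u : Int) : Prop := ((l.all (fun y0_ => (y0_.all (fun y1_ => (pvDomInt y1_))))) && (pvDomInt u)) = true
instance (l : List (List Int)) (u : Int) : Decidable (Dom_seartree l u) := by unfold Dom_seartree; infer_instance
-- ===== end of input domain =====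

-- B replaces A's recursion by an iterative explicit-stack DFS with a single running
-- node counter that returns -1 at the first ordering violation (alternative
-- decomposition, same cost; return value only — neither version mutates l).


-- ===== PORT A =====
-- Fuel-indexed transliteration of A's recursion; `none` = Python raised
-- (IndexError, or fuel out = infinite recursion on a cyclic reference).  Under
-- Pre_seartree the fuel l.length + 2 is proved sufficient (no `none`).
def searRec (l : List (List Int)) : Nat → Int → Option Int
  | 0, _ => none
  | f + 1, u =>
    match PySem.List.pyGet? l u with                       -- l[u]
    | none => none
    | some row =>
      if row = [] then some 1                              -- if not l[u]: return 1
      else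
        match PySem.List.pyGet? row 0 with                 -- l[u][0]
        | none => none
        | some x =>
          if 0 ≤ x ∧ u ≤ x then some (-1)                  -- l[u][0]>=0 and >=u
          else
            match (if 0 ≤ x then searRec l f x else some 0) with   -- le
            | none => none
            | some le =>
              match PySem.List.pyGet? row 1 with           -- l[u][1]
              | none => none
              | some y =>
                if 0 ≤ y ∧ y ≤ u then some (-1)            -- l[u][1]>=0 and <=u
                else
                  match (if 0 ≤ y then searRec l f y else some 0) with  -- ri
                  | none => none
                  | some ri => some (if 0 ≤ le ∧ 0 ≤ ri then 1 + le + ri else -1)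

def seartree (l : List (List Int)) (u : Int) : Int :=
  (searRec l (l.length + 2) u).getD 0

-- ===== PORT B =====
-- Transliteration of Source B's while-loop; the Lean list is the Python stack with
-- its head = the Python list's end (append = cons, pop = uncons).  Fuel counts
-- loop iterations; under Pre_seartree, 2 ^ (l.length + 2) iterations are proved
-- enough (the loop may visit a node once per distinct path to it).
def searLoop (l : List (List Int)) : Nat → List Int → Int → Option Int
  | 0, _, _ => none
  | _ + 1, [], count => some count                         -- while stack ends: return count
  | f + 1, node :: stack, count =>
    match PySem.List.pyGet? l node with                    -- row = l[node]
    | none => none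
    | some row =>
      if row = [] then searLoop l f stack (count + 1)      -- leaf: just count it
      else
        match PySem.List.pyGet? row 0 with                 -- a = row[0]
        | none => none
        | some a =>
          if 0 ≤ a ∧ node ≤ a then some (-1)               -- a>=0 and a>=node
          else
            match PySem.List.pyGet? row 1 with             -- b = row[1]
            | none => none
            | some b =>
              if 0 ≤ b ∧ b ≤ node then some (-1)           -- b>=0 and b<=node
              else
                searLoop l f
                  ((if 0 ≤ b then [b] else []) ++ (if 0 ≤ a then [a] else []) ++ stack)
                  (count + 1)

def seartree_alt (l : List (List Int)) (u : Int) : Int :=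
  (searLoop l (2 ^ (l.length + 2)) [u] 0).getD 0

-- ===== PRECONDITION & SPEC =====
-- l[v] as Python reads it (wrapping a negative v), [] when out of range.
def rowOf (l : List (List Int)) (v : Int) : List Int :=
  (PySem.List.pyGet? l v).getD []

-- The children A actually recurses into from node v (and B pushes): the left
-- entry when nonnegative and not an immediate violation, then the right entry
-- when nonnegative, in range, and not a violation.
def rightE (l : List (List Int)) (v : Int) : List Int → List Int
  | [] => []
  | b :: _ =>
    if (0 ≤ b ∧ b ≤ v) ∨ (l.length : Int) ≤ b then []
    else if 0 ≤ b then [b] else []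

def edgesRow (l : List (List Int)) (v : Int) : List Int → List Int
  | [] => []
  | a :: rest =>
    if 0 ≤ a ∧ v ≤ a then []
    else (if 0 ≤ a then [a] else []) ++ rightE l v rest

def edges (l : List (List Int)) (v : Int) : List Int :=
  edgesRow l v (rowOf l v)

-- Node v makes A raise when visited: a length-1 row read past its first entry
-- (IndexError on l[v][1]), or a followed right child index ≥ len(l)
-- (IndexError on l[child] at the next call).
def badTail (l : List (List Int)) (v : Int) : List Int → Bool
  | [] => true
  | b :: _ => decide (¬(0 ≤ b ∧ b ≤ v) ∧ (l.length : Int) ≤ b)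

def badRow (l : List (List Int)) (v : Int) : List Int → Bool
  | [] => false
  | a :: _rest =>
    if 0 ≤ a ∧ v ≤ a then false else badTail l v _rest

def badv (l : List (List Int)) (v : Int) : Bool :=
  badRow l v (rowOf l v)

-- one closure step of the followed-children graph, and its iterated closure
def stepCl (l : List (List Int)) (S : Finset Int) : Finset Int :=
  S ∪ S.biUnion (fun v => (edges l v).toFinset)

def reachF (l : List (List Int)) (u : Int) : Finset Int :=
  (stepCl l)^[l.length + 2] {u}

def descF (l : List (List Int)) (v : Int) : Finset Int :=
  (stepCl l)^[l.length + 2] (edges l v).toFinset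

-- Pre_seartree holds exactly when the Python A returns normally: it excludes
-- only the inputs on which A raises — a root index out of range (IndexError), a
-- reachable node whose visit raises (badv: IndexError on l[v][1] or on an
-- out-of-range right child), or a node reachable from one of its own
-- descendants (infinite recursion, RecursionError).
def Pre_seartree (l : List (List Int)) (u : Int) : Prop :=
  (-(l.length : Int) ≤ u ∧ u < (l.length : Int)) ∧
  (∀ v ∈ reachF l u, badv l v = false) ∧
  (∀ v ∈ reachF l u, v ∉ descF l v)

instance (l : List (List Int)) (u : Int) : Decidable (Pre_seartree l u) := by
  unfold Pre_seartree; infer_instance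

def pvWitness_seartree : List (List Int) × Int := ([[-1, -1], [0, 2], [-1, -1]], 1)

def Spec_seartree (l : List (List Int)) (u : Int) (out : Int) : Prop := out = seartree_alt l u
instance (l : List (List Int)) (u : Int) (out : Int) : Decidable (Spec_seartree l u out) := by
  unfold Spec_seartree; infer_instance

-- ===== CLAIM (what is proved, stated in full; the proofs are below) =====
def Claim_equal_seartree : Prop :=
  ∀ (l : List (List Int)) (u : Int), Dom_seartree l u → Pre_seartree l u →
    Spec_seartree l u (seartree l u)

-- ===== LEMMAS AND PROOFS =====

-- all vertices the closure can ever contain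
def allowedF (l : List (List Int)) (u : Int) : Finset Int :=
  insert u ((Finset.range l.length).image (fun k : Nat => (k : Int)))

lemma card_allowedF (l : List (List Int)) (u : Int) : (allowedF l u).card ≤ l.length + 1 := by
  calc (allowedF l u).card ≤ ((Finset.range l.length).image (fun k : Nat => (k : Int))).card + 1 :=
        Finset.card_insert_le _ _
    _ ≤ l.length + 1 := by
        have h1 := Finset.card_image_le (s := Finset.range l.length) (f := fun k : Nat => (k : Int))
        have h2 : (Finset.range l.length).card = l.length := Finset.card_range _
        omega

lemma mem_allowedF_of_range (l : List (List Int)) (u c : Int)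
    (h0 : 0 ≤ c) (h1 : c < (l.length : Int)) : c ∈ allowedF l u := by
  have : c = ((c.toNat : Nat) : Int) := by omega
  rw [this]
  apply Finset.mem_insert_of_mem
  exact Finset.mem_image.mpr ⟨c.toNat, Finset.mem_range.mpr (by omega), rfl⟩

lemma rowOf_nil_of_notInRange (l : List (List Int)) (v : Int)
    (h : ¬ PySem.Raise.InRange l.length v) : rowOf l v = [] := by
  unfold rowOf
  rw [(PySem.List.pyGet?_eq_none_iff l v).mpr h]
  rfl

lemma pyGet?_rowOf (l : List (List Int)) (v : Int)
    (h : PySem.Raise.InRange l.length v) : PySem.List.pyGet? l v = some (rowOf l v) := by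
  cases hg : PySem.List.pyGet? l v with
  | none => exact absurd ((PySem.List.pyGet?_eq_none_iff l v).mp hg) (by simpa using h)
  | some r => simp [rowOf, hg]

lemma edges_range (l : List (List Int)) (v c : Int) (hc : c ∈ edges l v) :
    0 ≤ c ∧ c < (l.length : Int) := by
  by_cases hir : PySem.Raise.InRange l.length v
  · have hv : v < (l.length : Int) := by
      simp [PySem.Raise.InRange] at hir; omega
    unfold edges at hc
    cases hrw : rowOf l v with
    | nil => rw [hrw] at hc; simp [edgesRow] at hc
    | cons a rest =>
      rw [hrw, edgesRow] at hc
      by_cases hviol : 0 ≤ a ∧ v ≤ a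
      · rw [if_pos hviol] at hc; simp at hc
      · rw [if_neg hviol] at hc
        rcases List.mem_append.mp hc with h | h
        · by_cases ha : 0 ≤ a
          · rw [if_pos ha] at h; simp at h; subst h
            exact ⟨ha, by omega⟩
          · rw [if_neg ha] at h; simp at h
        · cases rest with
          | nil => simp [rightE] at h
          | cons b rest2 =>
            rw [rightE] at h
            by_cases hb1 : (0 ≤ b ∧ b ≤ v) ∨ (l.length : Int) ≤ b
            · rw [if_pos hb1] at h; simp at h
            · rw [if_neg hb1] at h
              by_cases hb : 0 ≤ b
              · rw [if_pos hb] at h; simp at h; subst h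
                refine ⟨hb, ?_⟩
                rcases not_or.mp hb1 with ⟨h1, h2⟩
                omega
              · rw [if_neg hb] at h; simp at h
  · rw [edges, rowOf_nil_of_notInRange l v hir] at hc; simp [edgesRow] at hc

lemma mem_stepCl_self (l : List (List Int)) (S : Finset Int) : S ⊆ stepCl l S :=
  Finset.subset_union_left

lemma stepCl_subset_allowedF (l : List (List Int)) (u : Int) (S : Finset Int)
    (hS : S ⊆ allowedF l u) : stepCl l S ⊆ allowedF l u := by
  intro x hx
  rcases Finset.mem_union.mp hx with h | h
  · exact hS h
  · obtain ⟨v, _, hxe⟩ := Finset.mem_biUnion.mp h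
    have := edges_range l v x (List.mem_toFinset.mp hxe)
    exact mem_allowedF_of_range l u x this.1 this.2

lemma iterate_subset_allowedF (l : List (List Int)) (u : Int) (S : Finset Int)
    (hS : S ⊆ allowedF l u) (k : Nat) : (stepCl l)^[k] S ⊆ allowedF l u := by
  induction k with
  | zero => simpa using hS
  | succ k ih =>
    rw [Function.iterate_succ_apply']
    exact stepCl_subset_allowedF l u _ ih

lemma subset_iterate (l : List (List Int)) (S : Finset Int) (k : Nat) :
    S ⊆ (stepCl l)^[k] S := by
  induction k with
  | zero => simp
  | succ k ih =>
    rw [Function.iterate_succ_apply']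
    exact ih.trans (mem_stepCl_self l _)

lemma iterate_mono_subset (l : List (List Int)) (S : Finset Int) (k : Nat) :
    (stepCl l)^[k] S ⊆ (stepCl l)^[k + 1] S := by
  rw [Function.iterate_succ_apply']
  exact mem_stepCl_self l _

lemma iterate_growth (l : List (List Int)) (S : Finset Int) (k : Nat)
    (h : ∀ j < k, (stepCl l)^[j] S ≠ (stepCl l)^[j + 1] S) :
    k ≤ ((stepCl l)^[k] S).card := by
  induction k with
  | zero => simp
  | succ k ih =>
    have h1 : k ≤ ((stepCl l)^[k] S).card := ih (fun j hj => h j (by omega))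
    have h2 : (stepCl l)^[k] S ⊂ (stepCl l)^[k + 1] S :=
      (Finset.ssubset_iff_of_subset (iterate_mono_subset l S k)).mpr
        (by
          have hne := h k (by omega)
          rcases Finset.exists_of_ssubset (lt_of_le_of_ne (iterate_mono_subset l S k) hne) with
            ⟨x, hx1, hx2⟩
          exact ⟨x, hx1, hx2⟩)
    have := Finset.card_lt_card h2
    omega

lemma iterate_fix_propagate (l : List (List Int)) (S : Finset Int) (j : Nat)
    (h : (stepCl l)^[j] S = (stepCl l)^[j + 1] S) :
    ∀ m, (stepCl l)^[j + m] S = (stepCl l)^[j] S := by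
  intro m
  induction m with
  | zero => rfl
  | succ m ih =>
    have e1 : j + (m + 1) = (j + m) + 1 := by omega
    rw [e1, Function.iterate_succ_apply', ih,
      ← Function.iterate_succ_apply' (stepCl l) j S]
    exact h.symm

lemma iterate_closed (l : List (List Int)) (u : Int) (S : Finset Int)
    (hS : S ⊆ allowedF l u) :
    stepCl l ((stepCl l)^[l.length + 2] S) = (stepCl l)^[l.length + 2] S := by
  by_cases h : ∃ j < l.length + 2, (stepCl l)^[j] S = (stepCl l)^[j + 1] S
  · obtain ⟨j, hj, hfix⟩ := h
    have h1 := iterate_fix_propagate l S j hfix (l.length + 2 - j)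
    have hj2 : j + (l.length + 2 - j) = l.length + 2 := by omega
    rw [hj2] at h1
    rw [h1, ← Function.iterate_succ_apply' (stepCl l) j S]
    exact hfix.symm
  · exfalso
    have hg := iterate_growth l S (l.length + 2) (fun j hj heq => h ⟨j, hj, heq⟩)
    have hsub := iterate_subset_allowedF l u S hS (l.length + 2)
    have := Finset.card_le_card hsub
    have := card_allowedF l u
    omega

lemma reachF_closed (l : List (List Int)) (u : Int)
    (v c : Int) (hv : v ∈ reachF l u) (hc : c ∈ edges l v) : c ∈ reachF l u := by
  have hS : ({u} : Finset Int) ⊆ allowedF l u := by simp [allowedF]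
  have hcl := iterate_closed l u {u} hS
  unfold reachF
  rw [← hcl]
  exact Finset.mem_union_right _ (Finset.mem_biUnion.mpr ⟨v, hv, List.mem_toFinset.mpr hc⟩)

lemma reachF_subset_allowedF (l : List (List Int)) (u : Int) :
    reachF l u ⊆ allowedF l u :=
  iterate_subset_allowedF l u {u} (by simp [allowedF]) _

lemma edges_subset_descF (l : List (List Int)) (v : Int) :
    ∀ c ∈ edges l v, c ∈ descF l v := by
  intro c hc
  exact subset_iterate l _ _ (List.mem_toFinset.mpr hc)

lemma descF_closed (l : List (List Int)) (u : Int)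
    (x v c : Int) (hv : v ∈ descF l x) (hc : c ∈ edges l v) : c ∈ descF l x := by
  have hS : (edges l x).toFinset ⊆ allowedF l u := by
    intro y hy
    have := edges_range l x y (List.mem_toFinset.mp hy)
    exact mem_allowedF_of_range l u y this.1 this.2
  have hcl := iterate_closed l u (edges l x).toFinset hS
  unfold descF
  rw [← hcl]
  exact Finset.mem_union_right _ (Finset.mem_biUnion.mpr ⟨v, hv, List.mem_toFinset.mpr hc⟩)

lemma inRange_of_mem_reachF (l : List (List Int)) (u v : Int)
    (hu : -(l.length : Int) ≤ u ∧ u < (l.length : Int))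
    (hv : v ∈ reachF l u) : PySem.Raise.InRange l.length v := by
  have := reachF_subset_allowedF l u hv
  unfold allowedF at this
  rcases Finset.mem_insert.mp this with h | h
  · subst h; simp [PySem.Raise.InRange]; omega
  · obtain ⟨k, hk, hke⟩ := Finset.mem_image.mp h
    subst hke
    simp [PySem.Raise.InRange]
    simp at hk
    omega

-- termination: under Pre_seartree, the fueled A-port returns on every reachable
-- node; V is the chain of strict ancestors of v in the current call stack.
lemma term_lemma (l : List (List Int)) (u : Int)
    (hu : -(l.length : Int) ≤ u ∧ u < (l.length : Int))
    (hgood : ∀ v ∈ reachF l u, badv l v = false)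
    (hacyc : ∀ v ∈ reachF l u, v ∉ descF l v) :
    ∀ (f : Nat) (v : Int) (V : List Int),
      v ∈ reachF l u → V.Nodup → v ∉ V →
      (∀ x ∈ V, x ∈ reachF l u) → (∀ x ∈ V, v ∈ descF l x) →
      l.length + 2 ≤ f + V.length →
      ∃ a, searRec l f v = some a := by
  intro f
  induction f with
  | zero =>
    intro v V hv hVn hvV hVr hVd hfuel
    exfalso
    have hsub : (v :: V).toFinset ⊆ allowedF l u := by
      intro x hx
      simp at hx
      rcases hx with h | h
      · subst h; exact reachF_subset_allowedF l u hv
      · exact reachF_subset_allowedF l u (hVr x h)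
    have hnd : (v :: V).Nodup := List.nodup_cons.mpr ⟨hvV, hVn⟩
    have hcard : (v :: V).toFinset.card = V.length + 1 := by
      rw [List.toFinset_card_of_nodup hnd]; simp
    have := Finset.card_le_card hsub
    have := card_allowedF l u
    omega
  | succ f IH =>
    intro v V hv hVn hvV hVr hVd hfuel
    have hrow : PySem.List.pyGet? l v = some (rowOf l v) :=
      pyGet?_rowOf l v (inRange_of_mem_reachF l u v hu hv)
    -- the child invariants, packaged once
    have hchild : ∀ c ∈ edges l v, ∃ a, searRec l f c = some a := by
      intro c hc
      have hcr : c ∈ reachF l u := reachF_closed l u v c hv hc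
      have hcd : ∀ x ∈ v :: V, c ∈ descF l x := by
        intro x hx
        rcases List.mem_cons.mp hx with h | h
        · rw [h]; exact edges_subset_descF l v c hc
        · exact descF_closed l u x v c (hVd x h) hc
      have hcnv : c ∉ v :: V := by
        intro hmem
        exact hacyc c hcr (by
          have := hcd c hmem
          exact this)
      apply IH c (v :: V) hcr (List.nodup_cons.mpr ⟨hvV, hVn⟩)
        hcnv
        (by intro x hx
            rcases List.mem_cons.mp hx with h | h
            · subst h; exact hv
            · exact hVr x h)
        hcd
        (by simp; omega)
    cases hrw : rowOf l v with
    | nil =>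
      exact ⟨1, by simp [searRec, hrow, hrw]⟩
    | cons a rest =>
      have hget0 : PySem.List.pyGet? (a :: rest) 0 = some a :=
        PySem.List.pyGet?_zero_cons _ _
      by_cases hviol : 0 ≤ a ∧ v ≤ a
      · exact ⟨-1, by simp [searRec, hrow, hrw, hviol]⟩
      · have hleft : ∃ le, (if 0 ≤ a then searRec l f a else some 0) = some le := by
          by_cases hx : 0 ≤ a
          · have ha : a ∈ edges l v := by
              simp only [edges, hrw, edgesRow, if_neg hviol]
              exact List.mem_append_left _ (by simp [hx])
            obtain ⟨le, hle⟩ := hchild a ha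
            exact ⟨le, by simp [hx, hle]⟩
          · exact ⟨0, by simp [hx]⟩
        obtain ⟨le, hle⟩ := hleft
        cases hrest : rest with
        | nil =>
          exfalso
          have := hgood v hv
          rw [badv, hrw, hrest] at this
          simp only [badRow, if_neg hviol, badTail] at this
          simp at this
        | cons b rest2 =>
          have hget1 : PySem.List.pyGet? (a :: b :: rest2) 1 = some b := by
            have h1 : ((1 : Int)) = ((1 : Nat) : Int) := by norm_num
            rw [h1, PySem.List.pyGet?_natCast]
            rfl
          by_cases hbviol : 0 ≤ b ∧ b ≤ v
          · refine ⟨-1, ?_⟩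
            simp [searRec, hrow, hrw, hrest, hviol, hle, hbviol]
          · have hright : ∃ ri, (if 0 ≤ b then searRec l f b else some 0) = some ri := by
              by_cases hy : 0 ≤ b
              · have hbn : ¬ (l.length : Int) ≤ b := by
                  intro hbig
                  have := hgood v hv
                  rw [badv, hrw, hrest] at this
                  simp only [badRow, if_neg hviol, badTail] at this
                  rw [decide_eq_false_iff_not] at this
                  exact this ⟨hbviol, hbig⟩
                have hb : b ∈ edges l v := by
                  simp only [edges, hrw, hrest, edgesRow, if_neg hviol]
                  apply List.mem_append_right
                  rw [rightE, if_neg (by tauto), if_pos hy]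
                  simp
                obtain ⟨ri, hri⟩ := hchild b hb
                exact ⟨ri, by simp [hy, hri]⟩
              · exact ⟨0, by simp [hy]⟩
            obtain ⟨ri, hri⟩ := hright
            refine ⟨if 0 ≤ le ∧ 0 ≤ ri then 1 + le + ri else -1, ?_⟩
            simp [searRec, hrow, hrw, hrest, hviol, hle, hbviol, hri]

-- simulation: whenever the fueled A-port returns, B's loop pops the whole
-- subtree of u in some k ≤ 2^f - 1 iterations with the same outcome.
lemma sim_lemma (l : List (List Int)) :
    ∀ (f : Nat) (u a : Int), searRec l f u = some a →
      ∃ k : Nat, k + 1 ≤ 2 ^ f ∧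
        ((a = -1 ∧ ∀ st c F, searLoop l (k + 1 + F) (u :: st) c = some (-1)) ∨
         (0 ≤ a ∧ ∀ st c F, searLoop l (k + F) (u :: st) c = searLoop l F st (c + a))) := by
  intro f
  induction f with
  | zero => intro u a ha; simp [searRec] at ha
  | succ f IH =>
    intro u a ha
    cases hrow : PySem.List.pyGet? l u with
    | none => simp only [searRec, hrow] at ha; cases ha
    | some row =>
      simp only [searRec, hrow] at ha
      have h2f : 1 ≤ 2 ^ f := Nat.one_le_two_pow
      cases hrw : row with
      | nil =>
        rw [hrw] at ha; simp at ha
        refine ⟨1, by simp [pow_succ]; omega, Or.inr ⟨by omega, ?_⟩⟩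
        intro st c F
        have h1 : 1 + F = F + 1 := by omega
        rw [h1]
        simp [searLoop, hrow, hrw, ← ha]
      | cons r0 rest =>
        rw [hrw] at ha
        rw [if_neg (by simp)] at ha
        simp only [PySem.List.pyGet?_zero_cons] at ha
        by_cases hviol : 0 ≤ r0 ∧ u ≤ r0
        · rw [if_pos hviol] at ha
          simp at ha
          refine ⟨1, by simp [pow_succ]; omega, Or.inl ⟨ha.symm, ?_⟩⟩
          intro st c F
          have h1 : 1 + 1 + F = (1 + F) + 1 := by omega
          rw [h1]
          simp [searLoop, hrow, hrw, hviol]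
        · rw [if_neg hviol] at ha
          cases hle : (if 0 ≤ r0 then searRec l f r0 else some 0) with
          | none => simp only [hle] at ha; cases ha
          | some le =>
            simp only [hle] at ha
            -- uniform left property, over the pushed left segment
            have hLprop : ∃ kl : Nat, kl + 1 ≤ 2 ^ f ∧
                ((le = -1 ∧ ∀ st c F, searLoop l (kl + 1 + F)
                    ((if 0 ≤ r0 then [r0] else []) ++ st) c = some (-1)) ∨
                 (0 ≤ le ∧ ∀ st c F, searLoop l (kl + F)
                    ((if 0 ≤ r0 then [r0] else []) ++ st) c = searLoop l F st (c + le))) := by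
              by_cases hx : 0 ≤ r0
              · rw [if_pos hx] at hle
                obtain ⟨kl, hb, H⟩ := IH r0 le hle
                exact ⟨kl, hb, by simpa [hx] using H⟩
              · rw [if_neg hx] at hle
                simp at hle
                refine ⟨0, by omega, Or.inr ⟨by omega, ?_⟩⟩
                intro st c F
                simp [hx, ← hle]
            obtain ⟨kl, hklb, HL⟩ := hLprop
            cases hg1 : PySem.List.pyGet? (r0 :: rest) 1 with
            | none => simp only [hg1] at ha; cases ha
            | some r1 =>
              simp only [hg1] at ha
              by_cases hbviol : 0 ≤ r1 ∧ r1 ≤ u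
              · rw [if_pos hbviol] at ha
                simp at ha
                refine ⟨1, by simp [pow_succ]; omega, Or.inl ⟨ha.symm, ?_⟩⟩
                intro st c F
                have h1 : 1 + 1 + F = (1 + F) + 1 := by omega
                rw [h1]
                simp [searLoop, hrow, hrw, hviol, hg1, hbviol]
              · rw [if_neg hbviol] at ha
                cases hri : (if 0 ≤ r1 then searRec l f r1 else some 0) with
                | none => simp only [hri] at ha; cases ha
                | some ri =>
                  simp only [hri] at ha
                  simp at ha
                  have hRprop : ∃ kr : Nat, kr + 1 ≤ 2 ^ f ∧
                      ((ri = -1 ∧ ∀ st c F, searLoop l (kr + 1 + F)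
                          ((if 0 ≤ r1 then [r1] else []) ++ st) c = some (-1)) ∨
                       (0 ≤ ri ∧ ∀ st c F, searLoop l (kr + F)
                          ((if 0 ≤ r1 then [r1] else []) ++ st) c = searLoop l F st (c + ri))) := by
                    by_cases hy : 0 ≤ r1
                    · rw [if_pos hy] at hri
                      obtain ⟨kr, hb, H⟩ := IH r1 ri hri
                      exact ⟨kr, hb, by simpa [hy] using H⟩
                    · rw [if_neg hy] at hri
                      simp at hri
                      refine ⟨0, by omega, Or.inr ⟨by omega, ?_⟩⟩
                      intro st c F
                      simp [hy, ← hri]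
                  obtain ⟨kr, hkrb, HR⟩ := hRprop
                  -- one loop step pops u and pushes left then right
                  have hstep : ∀ (K : Nat) (st : List Int) (c : Int),
                      searLoop l (K + 1) (u :: st) c =
                        searLoop l K ((if 0 ≤ r1 then [r1] else []) ++
                          ((if 0 ≤ r0 then [r0] else []) ++ st)) (c + 1) := by
                    intro K st c
                    simp [searLoop, hrow, hrw, hviol, hg1, hbviol, List.append_assoc]
                  have hkb : (kr + kl + 1) + 1 ≤ 2 ^ (f + 1) := by
                    have : 2 ^ (f + 1) = 2 ^ f + 2 ^ f := by rw [pow_succ]; omega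
                    omega
                  refine ⟨kr + kl + 1, hkb, ?_⟩
                  rcases HR with ⟨hri1, hloopr⟩ | ⟨hri0, hloopr⟩
                  · -- right (popped first) hits a violation
                    refine Or.inl ⟨by rw [← ha, hri1]; simp, ?_⟩
                    intro st c F
                    have h2 : kr + kl + 1 + 1 + F = (kr + 1 + (kl + F)) + 1 := by omega
                    rw [h2, hstep]
                    exact hloopr _ _ _
                  · rcases HL with ⟨hle1, hloopl⟩ | ⟨hle0, hloopl⟩
                    · refine Or.inl ⟨by rw [← ha, hle1]; simp, ?_⟩
                      intro st c F
                      have h2 : kr + kl + 1 + 1 + F = (kr + (kl + 1 + F)) + 1 := by omega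
                      rw [h2, hstep, hloopr]
                      exact hloopl _ _ _
                    · refine Or.inr ⟨by rw [← ha, if_pos ⟨hle0, hri0⟩]; omega, ?_⟩
                      intro st c F
                      have h2 : kr + kl + 1 + F = (kr + (kl + F)) + 1 := by omega
                      rw [h2, hstep, hloopr, hloopl]
                      have h3 : c + 1 + ri + le = c + a := by
                        rw [← ha, if_pos ⟨hle0, hri0⟩]; ring
                      rw [h3]

-- ===== VERDICT (by name: the statement is the Claim_ definition above) =====
theorem seartree_spec : Claim_equal_seartree := by
  unfold Claim_equal_seartree
  intro l u _hdom hpre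
  unfold Spec_seartree
  obtain ⟨hu, hgood, hacyc⟩ := hpre
  have hur : u ∈ reachF l u := subset_iterate l {u} _ (Finset.mem_singleton_self u)
  obtain ⟨a, ha⟩ := term_lemma l u hu hgood hacyc (l.length + 2) u [] hur
    List.nodup_nil (by simp) (by simp) (by simp) (by simp)
  obtain ⟨k, hk, H⟩ := sim_lemma l (l.length + 2) u a ha
  have e1 : seartree l u = a := by simp [seartree, ha]
  rcases H with ⟨ha1, hloop⟩ | ⟨ha0, hloop⟩
  · have h2 : k + 1 + (2 ^ (l.length + 2) - (k + 1)) = 2 ^ (l.length + 2) := by omega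
    have := hloop [] 0 (2 ^ (l.length + 2) - (k + 1))
    rw [h2] at this
    simp [seartree_alt, this, e1, ha1]
  · have hF1 : 1 ≤ 2 ^ (l.length + 2) - k := by omega
    have h2 : k + (2 ^ (l.length + 2) - k) = 2 ^ (l.length + 2) := by omega
    have := hloop [] 0 (2 ^ (l.length + 2) - k)
    rw [h2] at this
    obtain ⟨F', hF'⟩ : ∃ F', 2 ^ (l.length + 2) - k = F' + 1 := ⟨_, (Nat.succ_pred_eq_of_pos hF1).symm⟩
    rw [hF'] at this
    have h5 : searLoop l (F' + 1) [] (0 + a) = some (0 + a) := by simp [searLoop]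
    rw [h5] at this
    simp [seartree_alt, this, e1]
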